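-- pv_equiv track=rewrite | github.com/hwchoi96/coding_test | menues.py | solution
-- ===== SOURCE A (Python) =====
-- def solution(orders):
--     answer = []
--
--     users = {}
--
--     for order in orders:
--         menues = order.split(' ')
--
--         user = menues[0]
--         menues = menues[1:]
--         menues = list(set(menues))
--
--         if user not in users:
--             users[user] = []
--             users[user].extend(menues)
--         else:
--             for menu in menues:
--                 if menu not in users[user]:
--                     users[user].append(menu)
--
--     # max_user = max(users, key=lambda x:x[1])
--
--     max_ = 0
--     for v in users.values():
--         if len(v) > max_:
--             max_ = len(v)
--     for k, v in users.items():
--         if len(v) == max_: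
--             answer.append(k)
--
--     # for k, v in users.items():
--     #     if len(v) == len(users[max_user]):
--     #         answer.append(k)
--
--     return sorted(answer)
-- ===== SOURCE B (Python) =====
-- def solution(orders):
--     split = [o.split(' ') for o in orders]
--     users = sorted({t[0] for t in split})
--     counts = [len({m for t in split if t[0] == u for m in t[1:]}) for u in users]
--     best = max(counts, default=0)
--     return [u for u, c in zip(users, counts) if c == best]
-- ===== Notes on version B (the rewrite author's own statement) =====
-- stated objective: alternative
-- what changed: A makes one pass maintaining a dict of per-user dedup lists with an inner membership scan, then two more passes over the dict for max and ties and sorts at the end; B keeps no dict at all: it splits once, sorts the distinct users up front, then for each user rescans the split orders to count that user's distinct menus with one set comprehension, and filters the already-sorted user list by the maximal count.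
import Mathlib
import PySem

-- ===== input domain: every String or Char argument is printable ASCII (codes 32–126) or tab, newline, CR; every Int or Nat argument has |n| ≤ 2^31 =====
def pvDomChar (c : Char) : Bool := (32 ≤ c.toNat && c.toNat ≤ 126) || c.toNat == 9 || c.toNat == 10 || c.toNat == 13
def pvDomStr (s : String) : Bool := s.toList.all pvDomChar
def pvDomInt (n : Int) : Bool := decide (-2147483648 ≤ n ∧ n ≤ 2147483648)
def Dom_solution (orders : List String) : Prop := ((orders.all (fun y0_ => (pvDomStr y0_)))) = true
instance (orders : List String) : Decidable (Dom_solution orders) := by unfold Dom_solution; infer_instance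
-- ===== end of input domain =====

-- B drops A's single-pass dict of per-user dedup lists: it splits once, sorts the distinct users up
-- front, counts each user's distinct menus by a per-user rescan of the split orders, and filters the
-- already-sorted user list by the maximal count; objective: alternative decomposition.

-- ===== PORT A =====
-- loop body of A's 'for order in orders' (users is the dict user -> list of distinct menus)
def aStep (users : PySem.Dict String (List String)) (order : String) : PySem.Dict String (List String) :=
  let menues0 := (PySem.Str.split? order " ").getD []   -- order.split(' '); sep is the literal " " ≠ "", so split? is 'some'
  let user := menues0.headI                             -- menues[0]; split always returns a non-empty list
  let menues := PySem.Set.ofList (PySem.List.slice menues0 (some 1) none)  -- list(set(menues[1:]))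
  if users.contains user = false then
    (users.insert user []).insert user ([] ++ menues)   -- users[user] = []; users[user].extend(menues)
  else
    menues.foldl (fun us menu =>
      if (us.getD user []).contains menu then us
      else us.insert user (us.getD user [] ++ [menu])) users

def solution (orders : List String) : List String :=
  let users := orders.foldl aStep PySem.Dict.empty
  let max_ : Nat := users.values.foldl (fun mx v => if mx < v.length then v.length else mx) 0
  let answer := users.items.foldl (fun ans kv => if kv.2.length == max_ then ans ++ [kv.1] else ans) []
  PySem.List.sorted answer (fun x => x) false

-- ===== PORT B =====
-- the set comprehension '{m for t in split if t[0] == u for m in t[1:]}' of Source B, as a list-with-distinct-elements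
def menusOf (split : List (List String)) (u : String) : List String :=
  PySem.Set.ofList ((split.filter (fun t => t.headI == u)).flatMap
    (fun t => PySem.List.slice t (some 1) none))

def solution_alt (orders : List String) : List String :=
  let split := orders.map (fun o => (PySem.Str.split? o " ").getD [])      -- [o.split(' ') for o in orders]
  let users := PySem.List.sorted (PySem.Set.ofList (split.map (fun t => t.headI))) (fun x => x) false  -- sorted({t[0] for t in split})
  let counts := users.map (fun u => (menusOf split u).length)              -- [len({...}) for u in users]
  let best := PySem.List.maxD counts (fun x => x) 0                        -- max(counts, default=0)
  ((users.zip counts).filter (fun p => p.2 == best)).map Prod.fst          -- [u for u, c in zip(users, counts) if c == best]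

-- ===== PRECONDITION & SPEC =====
def Spec_solution (orders : List String) (out : List String) : Prop := out = solution_alt orders
instance (orders : List String) (out : List String) : Decidable (Spec_solution orders out) := by unfold Spec_solution; infer_instance

-- ===== CLAIM (what is proved, stated in full; the proofs are below) =====
def Claim_equal_solution : Prop := ∀ (orders : List String), Dom_solution orders → Spec_solution orders (solution orders)

-- ===== LEMMAS AND PROOFS =====

-- coupling invariant: A's dict after processing the orders whose splits are 'split'
def InvA (split : List (List String)) (users : PySem.Dict String (List String)) : Prop :=
  users.keys = PySem.Set.ofList (split.map (fun t => t.headI)) ∧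
  ∀ u, users.getD u [] = menusOf split u

theorem update_ofList {α : Type} [BEq α] [LawfulBEq α] (s : PySem.Set α) (l : List α) :
    s.update (PySem.Set.ofList l) = s.update l := by
  rw [PySem.Set.update_eq_append_filter, PySem.Set.update_eq_append_filter, PySem.Set.ofList_ofList]

-- A's inner 'for menu in menues' loop is Set.update on the per-user list, keys untouched
theorem inner_loop (user : String) :
    ∀ (l : List String) (users : PySem.Dict String (List String)), users.contains user = true →
      (l.foldl (fun us menu =>
          if (us.getD user []).contains menu then us
          else us.insert user (us.getD user [] ++ [menu])) users).keys = users.keys ∧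
      ∀ u, (l.foldl (fun us menu =>
          if (us.getD user []).contains menu then us
          else us.insert user (us.getD user [] ++ [menu])) users).getD u []
        = if u = user then PySem.Set.update (users.getD user []) l else users.getD u [] := by
  intro l
  induction l with
  | nil =>
    intro users _
    refine ⟨rfl, fun u => ?_⟩
    split
    · next h => subst h; rfl
    · rfl
  | cons x t ih =>
    intro users hc
    simp only [List.foldl_cons]
    by_cases hx : (users.getD user []).contains x
    · rw [if_pos hx]
      obtain ⟨hk, hv⟩ := ih users hc
      refine ⟨hk, fun u => ?_⟩
      rw [hv u]
      have hmem : x ∈ users.getD user [] := by simpa using hx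
      simp [PySem.Set.update_cons, PySem.Set.add_of_mem hmem]
    · rw [if_neg hx]
      set users' := users.insert user (users.getD user [] ++ [x]) with husers'
      have hc' : users'.contains user = true := by
        rw [PySem.Dict.contains_iff_mem_keys, PySem.Dict.keys_insert_of_contains users _ hc,
          ← PySem.Dict.contains_iff_mem_keys]
        exact hc
      obtain ⟨hk, hv⟩ := ih users' hc'
      refine ⟨hk.trans (PySem.Dict.keys_insert_of_contains users _ hc), fun u => ?_⟩
      rw [hv u]
      have hget : users'.getD user [] = users.getD user [] ++ [x] := by
        rw [husers', PySem.Dict.getD_insert]; simp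
      by_cases hu : u = user
      · rw [if_pos hu, if_pos hu, hget]
        have hnm : x ∉ users.getD user [] := by simpa using hx
        rw [PySem.Set.update_cons, PySem.Set.add_of_not_mem hnm]
      · rw [if_neg hu, if_neg hu, husers', PySem.Dict.getD_insert, if_neg hu]

theorem menusOf_append (split : List (List String)) (toks : List String) (u : String) :
    menusOf (split ++ [toks]) u
      = if toks.headI = u
          then PySem.Set.update (menusOf split u) (PySem.List.slice toks (some 1) none)
          else menusOf split u := by
  unfold menusOf
  rw [List.filter_append, List.flatMap_append]
  by_cases h : toks.headI = u
  · simp [h, PySem.Set.ofList_append]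
  · simp [h, beq_false_of_ne h]

theorem outer_step (split : List (List String)) (users : PySem.Dict String (List String))
    (order : String) (hinv : InvA split users) :
    InvA (split ++ [(PySem.Str.split? order " ").getD []]) (aStep users order) := by
  obtain ⟨hk, hv⟩ := hinv
  unfold aStep
  set toks := (PySem.Str.split? order " ").getD [] with htoks
  set user := toks.headI with huser
  set sl := PySem.List.slice toks (some 1) none with hsl
  have hheads : (split ++ [toks]).map (fun t => t.headI) = split.map (fun t => t.headI) ++ [user] := by
    simp [huser]
  by_cases hcu : users.contains user = true
  · -- user already present: joint inner loop
    have hcu2 : users.contains toks.headI = true := hcu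
    rw [if_neg (by simp [hcu2])]
    obtain ⟨hk', hv'⟩ := inner_loop user (PySem.Set.ofList sl) users hcu
    refine ⟨?_, fun u => ?_⟩
    · rw [hk', hk, hheads, PySem.Set.ofList_append_singleton,
        PySem.Set.add_of_mem (hk ▸ (PySem.Dict.contains_iff_mem_keys users user).1 hcu)]
    · rw [hv' u, menusOf_append]
      by_cases hu : u = user
      · subst hu
        rw [if_pos rfl, if_pos rfl, hv, update_ofList]
      · rw [if_neg hu, if_neg (fun h => hu h.symm), hv]
  · -- fresh user
    have hcu' : users.contains user = false := by simpa using hcu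
    rw [if_pos hcu', PySem.Dict.insert_insert_self, List.nil_append]
    have hnm : user ∉ users.keys := fun h => hcu ((PySem.Dict.contains_iff_mem_keys users user).2 h)
    have hempty : menusOf split user = [] := by
      have h0 : users.getD user [] = [] := PySem.Dict.getD_of_not_contains users [] hcu'
      exact (hv user).symm.trans h0
    refine ⟨?_, fun u => ?_⟩
    · rw [PySem.Dict.keys_insert_of_not_contains users _ hcu', hk, hheads,
        PySem.Set.ofList_append_singleton, PySem.Set.add_of_not_mem (hk ▸ hnm)]
    · rw [PySem.Dict.getD_insert, menusOf_append]
      by_cases hu : u = user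
      · subst hu
        rw [if_pos rfl, if_pos rfl, hempty, PySem.Set.update_nil_left]
      · rw [if_neg hu, if_neg (fun h => hu h.symm), hv]

theorem main_loop : ∀ (orders : List String) (split : List (List String))
    (users : PySem.Dict String (List String)), InvA split users →
    InvA (split ++ orders.map (fun o => (PySem.Str.split? o " ").getD []))
      (orders.foldl aStep users) := by
  intro orders
  induction orders with
  | nil => intro split users h; simpa using h
  | cons o t ih =>
    intro split users h
    have := ih (split ++ [(PySem.Str.split? o " ").getD []]) (aStep users o)
      (outer_step split users o h)
    simpa [List.append_assoc] using this

-- Python's max(l, default=0) on a list of Nats is A's running-max loop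
theorem maxD_eq_foldl (l : List Nat) :
    PySem.List.maxD l (fun x => x) 0 = l.foldl (fun mx v => if mx < v then v else mx) 0 := by
  simp only [PySem.List.maxD, PySem.List.max?]
  conv_rhs => rw [show (0 : Nat) = (none : Option Nat).getD 0 from rfl]
  generalize (none : Option Nat) = o
  induction l generalizing o with
  | nil => rfl
  | cons x t ih =>
    simp only [List.foldl_cons]
    rw [ih]
    congr 1
    cases o with
    | none =>
      simp only [Option.getD_none, Option.getD_some]
      split
      · rfl
      · omega
    | some m => by_cases h : m < x <;> simp [h]

theorem runmax_eq_foldl_max : ∀ (l : List Nat) (a : Nat),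
    l.foldl (fun mx v => if mx < v then v else mx) a = l.foldl max a := by
  intro l
  induction l with
  | nil => intro a; rfl
  | cons x t ih =>
    intro a
    simp only [List.foldl_cons, ih]
    congr 1
    split <;> omega

theorem filter_zip_map {α : Type} (f : α → Nat) (b : Nat) :
    ∀ l : List α, ((l.zip (l.map f)).filter (fun p => p.2 == b)).map Prod.fst
      = l.filter (fun u => f u == b) := by
  intro l
  induction l with
  | nil => rfl
  | cons x t ih =>
    simp only [List.map_cons, List.zip_cons_cons, List.filter_cons]
    by_cases h : f x == b <;> simp [h, ih]

-- ===== VERDICT (by name: the statement is the Claim_ definition above) =====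
theorem solution_spec : Claim_equal_solution := by
  intro orders _
  unfold Spec_solution solution solution_alt
  dsimp only
  have hinv : InvA (orders.map (fun o => (PySem.Str.split? o " ").getD []))
      (orders.foldl aStep PySem.Dict.empty) := by
    have := main_loop orders [] PySem.Dict.empty
      ⟨rfl, fun u => by simp [PySem.Dict.getD_empty, menusOf]⟩
    simpa using this
  set split := orders.map (fun o => (PySem.Str.split? o " ").getD []) with hsplit
  set users := orders.foldl aStep PySem.Dict.empty with husers
  obtain ⟨hk, hv⟩ := hinv
  set heads := split.map (fun t => t.headI) with hheads
  have hknd : users.keys.Nodup := hk ▸ PySem.Set.nodup_ofList heads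
  set f : String → Nat := fun u => (menusOf split u).length with hf
  -- A's running max = B's best
  have hvalsA : users.values = users.keys.map (fun u => users.getD u []) :=
    PySem.Dict.values_eq_map_keys users hknd []
  have husorted : PySem.List.sorted (PySem.Set.ofList heads) (fun x => x) false
      = PySem.List.sorted users.keys (fun x => x) false := by rw [hk]
  have hperm : ((PySem.List.sorted users.keys (fun x => x) false).map f).Perm (users.keys.map f) :=
    (PySem.List.sorted_perm users.keys (fun x => x) false).map f
  have hmax : users.values.foldl (fun mx v => if mx < v.length then v.length else mx) 0
      = PySem.List.maxD ((PySem.List.sorted (PySem.Set.ofList heads) (fun x => x) false).map f)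
          (fun x => x) 0 := by
    rw [maxD_eq_foldl, husorted, runmax_eq_foldl_max, hperm.foldl_eq 0, hvalsA, List.foldl_map,
      List.foldl_map]
    have hfun : (fun (x : Nat) (y : String) =>
        if x < (users.getD y []).length then (users.getD y []).length else x)
        = fun (x : Nat) (y : String) => max x (f y) := by
      funext x y
      rw [hv y]
      simp only [hf]
      split <;> omega
    rw [hfun]
  set best := PySem.List.maxD ((PySem.List.sorted (PySem.Set.ofList heads) (fun x => x) false).map f)
      (fun x => x) 0 with hbest
  -- A's answer list = keys filtered by the max count
  have hitems : users.items = users.keys.map (fun u => (u, users.getD u [])) :=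
    PySem.Dict.items_eq_map_keys users hknd []
  rw [PySem.List.foldl_append_if (fun kv : String × List String => kv.2.length ==
    users.values.foldl (fun mx v => if mx < v.length then v.length else mx) 0)
    (fun kv => kv.1) users.items [], List.nil_append, hitems, hmax, List.filter_map,
    List.map_map]
  have hpred : ((fun kv : String × List String => kv.2.length == best) ∘
      (fun u => (u, users.getD u []))) = fun u => f u == best := by
    funext u
    simp only [Function.comp]
    rw [hv u]
  rw [hpred]
  simp only [Function.comp_def]
  have hmapfst : (List.map (fun u => (u, users.getD u []) |>.1)
      (List.filter (fun u => f u == best) users.keys)) = List.filter (fun u => f u == best) users.keys := by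
    simp
  -- sorting commutes with the filter (keys are distinct, so sorted keys is strictly increasing)
  have hpwlt : (PySem.List.sorted (PySem.Set.ofList heads) (fun x => x) false).Pairwise (· < ·) :=
    PySem.List.sorted_ofList_pairwise_lt heads
  have hsf : PySem.List.sorted (users.keys.filter (fun u => f u == best)) (fun x => x) false
      = (PySem.List.sorted (PySem.Set.ofList heads) (fun x => x) false).filter (fun u => f u == best) := by
    apply PySem.List.sorted_eq_of_perm_of_pairwise_lt
    · rw [husorted]
      exact (PySem.List.sorted_perm users.keys (fun x => x) false).filter _
    · exact hpwlt.filter _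
  rw [hmapfst, hsf, filter_zip_map]
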